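-- pv_equiv track=rewrite | github.com/junha1052/med_chatbot | chat/rag_utils.py | search_medications
-- ===== SOURCE A (Python) =====
-- def search_medications(query: str, medications: list[dict]) -> dict:
--     '''
--     역할: 사용자 질문(query)에서 언급된 약물명을 all_med 리스트에서 찾아 반환
--     입력: query: str — 사용자 질문
--           all_med: List[Dict] — 전체 약물 정보
--     출력: med: Dict — 매칭된 약물 정보 (없으면 {})
--     '''
--     if not isinstance(query, str) or not isinstance(medications, list):
--         return {}
--
--     q = query.lower()
--     for med in medications:
--         if not isinstance(med, dict):
--             continue
--         name = med.get("name", "").lower()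
--         if name and name in q:
--             return med
--     return {}
-- ===== SOURCE B (Python) =====
-- def search_medications(query: str, medications: list[dict]) -> dict:
--     if not isinstance(query, str) or not isinstance(medications, list):
--         return {}
--     q = query.lower()
--     named = []
--     for med in medications:
--         if not isinstance(med, dict):
--             continue
--         name = med.get("name", "").lower()
--         if name:
--             named.append((name, med))
--     maxlen = 0
--     for name, _ in named:
--         maxlen = max(maxlen, len(name))
--     subs = {q[i:i + n] for i in range(len(q)) for n in range(1, maxlen + 1)}
--     for name, med in named:
--         if name in subs:
--             return med
--     return {}
-- ===== Notes on version B (the rewrite author's own statement) =====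
-- stated objective: alternative
-- what changed: Instead of scanning the whole query for each medication name, B collects the (lowered, nonempty) names once, precomputes the hash set of all query substrings up to the longest name length, and answers each medication with one set lookup.
import Mathlib
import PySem

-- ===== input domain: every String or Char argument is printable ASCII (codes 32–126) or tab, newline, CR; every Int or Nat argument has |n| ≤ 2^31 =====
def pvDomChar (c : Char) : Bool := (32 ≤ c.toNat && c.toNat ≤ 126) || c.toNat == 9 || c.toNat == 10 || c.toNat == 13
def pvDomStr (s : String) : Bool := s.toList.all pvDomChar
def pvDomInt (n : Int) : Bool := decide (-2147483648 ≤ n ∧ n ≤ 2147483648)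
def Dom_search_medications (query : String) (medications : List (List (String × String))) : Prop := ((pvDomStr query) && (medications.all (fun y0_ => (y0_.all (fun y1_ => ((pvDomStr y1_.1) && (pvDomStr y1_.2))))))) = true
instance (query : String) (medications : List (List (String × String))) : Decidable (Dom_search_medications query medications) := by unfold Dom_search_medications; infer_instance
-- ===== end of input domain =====

-- B replaces A's per-medication substring scan of the query by one precomputed hash set of
-- the query's substrings up to the longest medication-name length, looked up per name.
-- (The typed signature makes A's isinstance guards vacuously true; they are not ported.)

-- med.get("name", "").lower() — the same expression in both sources, ported once.
def medName (med : List (String × String)) : String :=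
  PySem.Str.lower (PySem.Dict.getD (PySem.Dict.mk med) "name" "")

-- ===== PORT A =====
-- A's 'for med in medications: … return med' loop, step for step.
def searchA (q : String) : List (List (String × String)) → List (String × String)
  | [] => []
  | med :: rest =>
      if medName med ≠ "" ∧ PySem.Str.isIn (medName med) q then med else searchA q rest

def search_medications (query : String) (medications : List (List (String × String))) : List (String × String) :=
  searchA (PySem.Str.lower query) medications

-- ===== PORT B =====
-- Source B's first loop: collect (lowered nonempty name, med) pairs in order.
def collectNamed : List (List (String × String)) → List (String × List (String × String))
  | [] => []
  | med :: rest =>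
      if medName med ≠ "" then (medName med, med) :: collectNamed rest else collectNamed rest

-- Source B's second loop: maxlen = max(maxlen, len(name)) over named, starting from 0
-- (Python len ported as toList.length — exact).
def maxNameLen (named : List (String × List (String × String))) : Nat :=
  named.foldl (fun m p => max m p.1.toList.length) 0

-- Source B's set comprehension {q[i:i+n] for i in range(len(q)) for n in range(1, maxlen+1)},
-- built on List Char: the slice q[i:i+n] (0 ≤ i < len(q), n ≥ 1) is (q.drop i).take n — exact,
-- both clamp at the end of the string.
def querySubs (q : List Char) (maxlen : Nat) : PySem.Set (List Char) :=
  PySem.Set.ofList ((List.range q.length).flatMap (fun i =>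
    (List.range' 1 maxlen).map (fun n => (q.drop i).take n)))

-- Source B's final loop: first named pair whose name is in the set.
def findNamed (subs : PySem.Set (List Char)) : List (String × List (String × String)) → List (String × String)
  | [] => []
  | (name, med) :: rest =>
      if PySem.Set.contains subs name.toList then med else findNamed subs rest

def search_medications_alt (query : String) (medications : List (List (String × String))) : List (String × String) :=
  let q := PySem.Str.lower query
  let named := collectNamed medications
  let subs := querySubs q.toList (maxNameLen named)
  findNamed subs named

-- ===== PRECONDITION & SPEC =====
def Spec_search_medications (query : String) (medications : List (List (String × String))) (out : List (String × String)) : Prop := out = search_medications_alt query medications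
instance (query : String) (medications : List (List (String × String))) (out : List (String × String)) : Decidable (Spec_search_medications query medications out) := by unfold Spec_search_medications; infer_instance

-- ===== CLAIM (what is proved, stated in full; the proofs are below) =====
def Claim_equal_search_medications : Prop := ∀ (query : String) (medications : List (List (String × String))), Dom_search_medications query medications → Spec_search_medications query medications (search_medications query medications)

-- ===== LEMMAS AND PROOFS =====

-- Every collected name's length is bounded by Source B's maxlen fold, from any start value.
lemma le_foldl_maxlen (named : List (String × List (String × String))) (acc : Nat) :
    ∀ p ∈ named, p.1.toList.length ≤ named.foldl (fun m p => max m p.1.toList.length) acc := by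
  have hstart : ∀ (l : List (String × List (String × String))) (a : Nat),
      a ≤ l.foldl (fun m p => max m p.1.toList.length) a := by
    intro l
    induction l with
    | nil => intro a; simp
    | cons h2 t2 ih2 =>
      intro a; rw [List.foldl_cons]; exact le_trans (Nat.le_max_left _ _) (ih2 _)
  induction named generalizing acc with
  | nil => intro p hp; cases hp
  | cons hd tl ih =>
    intro p hp
    rw [List.foldl_cons]
    rcases List.mem_cons.mp hp with hp | hp
    · subst hp; exact le_trans (Nat.le_max_right _ _) (hstart tl _)
    · exact ih _ p hp

-- Membership in the precomputed substring set IS the substring test, for a nonempty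
-- name of length ≤ maxlen.
lemma mem_querySubs (q name : List Char) (maxlen : Nat)
    (hne : name ≠ []) (hlen : name.length ≤ maxlen) :
    name ∈ querySubs q maxlen ↔ name <:+: q := by
  have hpos : 0 < name.length := List.length_pos_iff.mpr hne
  unfold querySubs
  rw [PySem.Set.mem_ofList]
  simp only [List.mem_flatMap, List.mem_map, List.mem_range, List.mem_range'_1]
  constructor
  · rintro ⟨i, _, n, _, rfl⟩
    exact ((q.drop i).take_prefix n).isInfix.trans (q.drop_suffix i).isInfix
  · rintro ⟨s, t, rfl⟩
    refine ⟨s.length, ?_, name.length, ⟨by omega, by omega⟩, ?_⟩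
    · simp [List.length_append]; omega
    · rw [List.append_assoc, List.drop_left, List.take_left]

-- The two loops agree whenever ML bounds every collected name's length.
lemma loops_eq (q : String) (ML : Nat) :
    ∀ meds : List (List (String × String)),
    (∀ p ∈ collectNamed meds, p.1.toList.length ≤ ML) →
    searchA q meds = findNamed (querySubs q.toList ML) (collectNamed meds) := by
  intro meds
  induction meds with
  | nil => intro _; rfl
  | cons med rest ih =>
    intro hbound
    by_cases hname : medName med = ""
    · rw [searchA, collectNamed, if_neg (by simp [hname]), if_neg (by simp [hname])]
      exact ih (by rw [collectNamed, if_neg (by simp [hname])] at hbound; exact hbound)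
    · have hcol : collectNamed (med :: rest) = (medName med, med) :: collectNamed rest := by
        rw [collectNamed, if_pos hname]
      have hlen : (medName med).toList.length ≤ ML := by
        apply hbound (medName med, med)
        rw [hcol]; exact List.mem_cons_self
      have hne : (medName med).toList ≠ [] := by
        intro h; exact hname (String.toList_eq_nil_iff.mp h)
      have hiff : (PySem.Str.isIn (medName med) q = true) ↔
          (PySem.Set.contains (querySubs q.toList ML) (medName med).toList = true) := by
        rw [PySem.Str.isIn_iff_infix, PySem.Set.contains_iff,
          mem_querySubs q.toList (medName med).toList ML hne hlen]
      rw [searchA, hcol, findNamed]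
      by_cases hin : PySem.Str.isIn (medName med) q = true
      · rw [if_pos ⟨hname, hin⟩, if_pos (hiff.mp hin)]
      · rw [if_neg (fun h => hin h.2), if_neg (fun h => hin (hiff.mpr h))]
        exact ih (fun p hp => hbound p (by rw [hcol]; exact List.mem_cons_of_mem _ hp))

-- ===== VERDICT (by name: the statement is the Claim_ definition above) =====
theorem search_medications_spec : Claim_equal_search_medications := by
  intro query meds _
  unfold Spec_search_medications search_medications search_medications_alt
  exact loops_eq (PySem.Str.lower query) (maxNameLen (collectNamed meds)) meds
    (fun p hp => le_foldl_maxlen (collectNamed meds) 0 p hp)
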